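-- pv_equiv track=rewrite | github.com/Zombiesama18/Leetcode_Python | Leetcode/1961. 检查字符串是否为数组前缀.py | isPrefixStringVersion2
-- ===== SOURCE A (Python) =====
-- def isPrefixStringVersion2(s: str, words: [str]) -> bool:
--     index = 0
--     length = len(s)
--     for word in words:
--         for char in word:
--             if index == length:
--                 return False
--             if char != s[index]:
--                 return False
--             index += 1
--         if index == length:
--             return True
--     return False
-- ===== SOURCE B (Python) =====
-- def isPrefixStringVersion2(s: str, words: [str]) -> bool:
--     prefix = ''
--     for word in words:
--         prefix += word
--         if len(prefix) >= len(s):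
--             return prefix == s
--     return False
-- ===== Notes on version B (the rewrite author's own statement) =====
-- stated objective: simpler
-- what changed: Replaces the character-by-character inner loop with a manual index by accumulating the concatenation word by word and comparing whole strings at the first word boundary where the accumulated length reaches len(s).
import Mathlib
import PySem

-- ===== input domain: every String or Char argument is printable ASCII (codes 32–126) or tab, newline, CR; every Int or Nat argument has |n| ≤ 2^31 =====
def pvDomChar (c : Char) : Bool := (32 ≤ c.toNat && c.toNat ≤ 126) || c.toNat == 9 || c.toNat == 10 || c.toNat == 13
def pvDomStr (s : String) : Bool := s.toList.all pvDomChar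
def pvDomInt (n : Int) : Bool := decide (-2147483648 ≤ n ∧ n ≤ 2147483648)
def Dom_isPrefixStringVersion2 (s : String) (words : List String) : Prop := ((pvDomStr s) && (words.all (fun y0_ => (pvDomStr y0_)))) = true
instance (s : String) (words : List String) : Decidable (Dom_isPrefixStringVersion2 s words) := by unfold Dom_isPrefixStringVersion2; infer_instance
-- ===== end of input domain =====

-- B replaces A's character-by-character scan (manual index) by accumulating the
-- concatenation word by word and comparing whole strings at the first word
-- boundary where the accumulated length reaches len(s); objective: simpler.

-- ===== PORT A =====
-- inner 'for char in word' loop of A: returns none on 'return False', else the updated index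
def pvInnerA (sl : List Char) (length : Nat) : List Char → Nat → Option Nat
  | [], index => some index
  | c :: cs, index =>
    if index = length then none
    else if some c ≠ PySem.List.pyGet? sl (index : Int) then none
    else pvInnerA sl length cs (index + 1)

-- outer 'for word in words' loop of A
def pvOuterA (sl : List Char) (length : Nat) : List (List Char) → Nat → Bool
  | [], _ => false
  | w :: ws, index =>
    match pvInnerA sl length w index with
    | none => false
    | some i => if i = length then true else pvOuterA sl length ws i

def isPrefixStringVersion2 (s : String) (words : List String) : Bool :=
  pvOuterA s.toList s.toList.length (words.map String.toList) 0

-- ===== PORT B =====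
-- Source B's loop: grow the accumulated prefix; decide at the first boundary reaching len(s)
def pvGoB (sl : List Char) : List (List Char) → List Char → Bool
  | [], _ => false
  | w :: ws, pre =>
    let p := pre ++ w
    if sl.length ≤ p.length then p == sl else pvGoB sl ws p

def isPrefixStringVersion2_alt (s : String) (words : List String) : Bool :=
  pvGoB s.toList (words.map String.toList) []

-- ===== PRECONDITION & SPEC =====
def Spec_isPrefixStringVersion2 (s : String) (words : List String) (out : Bool) : Prop := out = isPrefixStringVersion2_alt s words
instance (s : String) (words : List String) (out : Bool) : Decidable (Spec_isPrefixStringVersion2 s words out) := by unfold Spec_isPrefixStringVersion2; infer_instance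

-- ===== CLAIM (what is proved, stated in full; the proofs are below) =====
def Claim_equal_isPrefixStringVersion2 : Prop := ∀ (s : String) (words : List String), Dom_isPrefixStringVersion2 s words → Spec_isPrefixStringVersion2 s words (isPrefixStringVersion2 s words)

-- ===== LEMMAS AND PROOFS =====

-- A's inner loop succeeds exactly when the already-matched prefix extended by w is still a prefix of sl
lemma pvInnerA_eq (sl : List Char) (w : List Char) (index : Nat) (h : index ≤ sl.length) :
    pvInnerA sl sl.length w index =
      if sl.take index ++ w <+: sl then some (index + w.length) else none := by
  induction w generalizing index with
  | nil =>
    simp [pvInnerA, List.take_prefix]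
  | cons c cs ih =>
    by_cases hidx : index = sl.length
    · subst hidx
      rw [show pvInnerA sl sl.length (c :: cs) sl.length = none by simp [pvInnerA]]
      rw [if_neg]
      intro hp
      have := hp.length_le
      simp at this
    · have hlt : index < sl.length := lt_of_le_of_ne h hidx
      have hget : PySem.List.pyGet? sl (index : Int) = some sl[index] := by
        rw [PySem.List.pyGet?_natCast]
        exact List.getElem?_eq_getElem hlt
      have hlen : (sl.take index).length = index := by simp [List.length_take]; omega
      by_cases hc : c = sl[index]
      · have htake : sl.take (index + 1) = sl.take index ++ [sl[index]] := by
          rw [List.take_add_one]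
          simp [List.getElem?_eq_getElem hlt]
        have hl : sl.take (index + 1) ++ cs = sl.take index ++ c :: cs := by
          rw [hc, htake, List.append_assoc, List.singleton_append]
        have hiff : (sl.take index ++ c :: cs <+: sl) ↔ (sl.take (index + 1) ++ cs <+: sl) := by
          rw [hl]
        rw [show pvInnerA sl sl.length (c :: cs) index = pvInnerA sl sl.length cs (index + 1) by
          simp [pvInnerA, hidx, hget, hc]]
        rw [ih (index + 1) hlt]
        by_cases hp : sl.take (index + 1) ++ cs <+: sl
        · rw [if_pos hp, if_pos (hiff.mpr hp)]
          congr 1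
          simp
          omega
        · rw [if_neg hp, if_neg (fun hq => hp (hiff.mp hq))]
      · have hnp : ¬ (sl.take index ++ c :: cs <+: sl) := by
          rintro ⟨t, ht⟩
          have ht' : sl = sl.take index ++ c :: (cs ++ t) := by
            conv_lhs => rw [← ht]
            simp
          have h1 : PySem.List.pyGet? (sl.take index ++ c :: (cs ++ t))
              (((sl.take index).length : Nat) : Int) = some c :=
            PySem.List.pyGet?_append_length _ _ _
          rw [← ht', hlen, hget] at h1
          exact hc (Option.some.inj h1).symm
        simp [pvInnerA, hidx, hget, hc, hnp]

-- once the accumulated string is not a prefix of sl, B can only answer false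
lemma pvGoB_not_prefix (sl : List Char) : ∀ (ws : List (List Char)) (p : List Char),
    ¬ p <+: sl → pvGoB sl ws p = false := by
  intro ws
  induction ws with
  | nil => intro p _; rfl
  | cons w ws ih =>
    intro p hp
    simp only [pvGoB]
    split
    · simp only [beq_eq_false_iff_ne, ne_eq]
      intro he
      exact hp ⟨w, he⟩
    · exact ih (p ++ w) (fun hq => hp ((List.prefix_append p w).trans hq))

-- lockstep: while the first `index` characters matched, A's state corresponds to B's accumulator sl.take index
lemma pvLockstep (sl : List Char) : ∀ (ws : List (List Char)) (index : Nat), index ≤ sl.length →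
    pvOuterA sl sl.length ws index = pvGoB sl ws (sl.take index) := by
  intro ws
  induction ws with
  | nil => intro index _; rfl
  | cons w ws ih =>
    intro index h
    have hlen : (sl.take index).length = index := by simp [List.length_take]; omega
    by_cases hp : sl.take index ++ w <+: sl
    · have houter : pvOuterA sl sl.length (w :: ws) index =
          if index + w.length = sl.length then true else pvOuterA sl sl.length ws (index + w.length) := by
        simp [pvOuterA, pvInnerA_eq sl w index h, hp]
      have hle : index + w.length ≤ sl.length := by
        have := hp.length_le
        simp at this
        omega
      have hpe : sl.take index ++ w = sl.take (index + w.length) := by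
        have := List.prefix_iff_eq_take.mp hp
        simpa [hlen] using this
      rw [houter]
      by_cases hend : index + w.length = sl.length
      · have hfull : sl.take index ++ w = sl := by
          rw [hpe, hend, List.take_length]
        simp [pvGoB, hend, hfull]
      · rw [if_neg hend]
        simp only [pvGoB]
        rw [if_neg (show ¬ sl.length ≤ (sl.take index ++ w).length by simp [hlen]; omega)]
        rw [hpe]
        exact ih _ hle
    · have houter : pvOuterA sl sl.length (w :: ws) index = false := by
        simp [pvOuterA, pvInnerA_eq sl w index h, hp]
      rw [houter]
      simp only [pvGoB]
      split
      · symm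
        simp only [beq_eq_false_iff_ne, ne_eq]
        intro he
        exact hp ⟨[], by simp [he]⟩
      · exact (pvGoB_not_prefix sl ws _ hp).symm

-- ===== VERDICT (by name: the statement is the Claim_ definition above) =====
theorem isPrefixStringVersion2_spec : Claim_equal_isPrefixStringVersion2 := by
  intro s words _
  unfold Spec_isPrefixStringVersion2 isPrefixStringVersion2 isPrefixStringVersion2_alt
  simpa using pvLockstep s.toList (words.map String.toList) 0 (Nat.zero_le _)
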